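-- pv_equiv track=rewrite | github.com/Ehrii/Resume-Parser-NLP | resume_parser/app_draft 4.py | normalize_education
-- ===== SOURCE A (Python) =====
-- def normalize_education(edu):
--     edu = edu.lower()
--     if any(term in edu for term in ['pre-school', 'preschool', 'kindergarten']):
--         return 'Early Childhood Education'
--     elif any(term in edu for term in ['elementary', 'primary']):
--         return 'Elementary School'
--     elif any(term in edu for term in ['junior high', 'secondary']):
--         return 'Junior High School'
--     elif 'senior high' in edu:
--         return 'Senior High School'
--     elif 'associate' in edu:
--         return 'Associate\'s Degree'
--     elif 'some college' in edu:
--         return 'Some College Level'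
--     elif 'college graduate' in edu:
--         return 'College Graduate'
--     elif 'vocational graduate' in edu:
--         return 'Vocational Graduate'
--     elif 'vocational undergraduate' in edu:
--         return 'Vocational Undergraduate'
--     elif any(term in edu for term in ['bachelor', 'college', 'university']):
--         return 'Bachelor\'s Degree'
--     elif 'master' in edu:
--         return 'Master\'s Degree'
--     elif any(term in edu for term in ['phd', 'doctorate', 'doctoral']):
--         return 'Doctoral Degree'
--     elif any(term in edu for term in ['tvet', 'technical-vocational', 'tesda']):
--         return 'Technical-Vocational Education and Training'
--     else:
--         return edu.title()
-- ===== SOURCE B (Python) =====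
-- # B: instead of an ordered first-match chain, collect ALL matching labels and
-- # select the highest-priority one with min(key=ORDER.index).
--
-- PATTERNS = [
--     ('pre-school', 'Early Childhood Education'),
--     ('preschool', 'Early Childhood Education'),
--     ('kindergarten', 'Early Childhood Education'),
--     ('elementary', 'Elementary School'),
--     ('primary', 'Elementary School'),
--     ('junior high', 'Junior High School'),
--     ('secondary', 'Junior High School'),
--     ('senior high', 'Senior High School'),
--     ('associate', "Associate's Degree"),
--     ('some college', 'Some College Level'),
--     ('college graduate', 'College Graduate'),
--     ('vocational graduate', 'Vocational Graduate'),
--     ('vocational undergraduate', 'Vocational Undergraduate'),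
--     ('bachelor', "Bachelor's Degree"),
--     ('college', "Bachelor's Degree"),
--     ('university', "Bachelor's Degree"),
--     ('master', "Master's Degree"),
--     ('phd', 'Doctoral Degree'),
--     ('doctorate', 'Doctoral Degree'),
--     ('doctoral', 'Doctoral Degree'),
--     ('tvet', 'Technical-Vocational Education and Training'),
--     ('technical-vocational', 'Technical-Vocational Education and Training'),
--     ('tesda', 'Technical-Vocational Education and Training'),
-- ]
--
-- ORDER = [
--     'Early Childhood Education',
--     'Elementary School',
--     'Junior High School',
--     'Senior High School',
--     "Associate's Degree",
--     'Some College Level',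
--     'College Graduate',
--     'Vocational Graduate',
--     'Vocational Undergraduate',
--     "Bachelor's Degree",
--     "Master's Degree",
--     'Doctoral Degree',
--     'Technical-Vocational Education and Training',
-- ]
--
-- def normalize_education(edu):
--     edu = edu.lower()
--     hits = [label for pat, label in PATTERNS if pat in edu]
--     return min(hits, key=ORDER.index) if hits else edu.title()
-- ===== Notes on version B (the rewrite author's own statement) =====
-- stated objective: alternative
-- what changed: Instead of an ordered if/elif first-match chain, B collects ALL matching labels from a flat (pattern,label) list and selects the highest-priority one via min(key=ORDER.index), with title() only when nothing matches.
import Mathlib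
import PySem

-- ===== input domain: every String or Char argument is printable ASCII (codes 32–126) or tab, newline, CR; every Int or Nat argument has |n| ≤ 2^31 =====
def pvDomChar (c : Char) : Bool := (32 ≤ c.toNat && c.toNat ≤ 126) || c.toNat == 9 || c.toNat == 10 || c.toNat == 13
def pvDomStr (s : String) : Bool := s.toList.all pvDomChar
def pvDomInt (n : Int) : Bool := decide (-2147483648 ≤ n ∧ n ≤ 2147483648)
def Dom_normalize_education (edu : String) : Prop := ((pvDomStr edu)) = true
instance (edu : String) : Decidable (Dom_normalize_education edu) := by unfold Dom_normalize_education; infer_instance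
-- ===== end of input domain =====

-- B replaces A's ordered if/elif first-match chain by collecting ALL matching labels and
-- selecting the highest-priority one with min(key=ORDER.index) (alternative decomposition, same cost).

-- str.title() for ASCII (exact on the printable-ASCII domain): a letter after a non-letter is
-- uppercased, a letter after a letter is lowercased, other characters are unchanged.
def pyTitleGo : Bool → List Char → List Char
  | _, [] => []
  | prevAlpha, c :: t =>
      (if PySem.Chars.isalpha c then
        (if prevAlpha then PySem.Chars.lowerChar c else PySem.Chars.upperChar c)
       else c) :: pyTitleGo (PySem.Chars.isalpha c) t

def pyTitle (s : String) : String := String.ofList (pyTitleGo false s.toList)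

-- ===== PORT A =====
def normalize_education (edu : String) : String :=
  let e := PySem.Str.lower edu
  if PySem.Str.isIn "pre-school" e || (PySem.Str.isIn "preschool" e || PySem.Str.isIn "kindergarten" e) then
    "Early Childhood Education"
  else if PySem.Str.isIn "elementary" e || PySem.Str.isIn "primary" e then
    "Elementary School"
  else if PySem.Str.isIn "junior high" e || PySem.Str.isIn "secondary" e then
    "Junior High School"
  else if PySem.Str.isIn "senior high" e then
    "Senior High School"
  else if PySem.Str.isIn "associate" e then
    "Associate's Degree"
  else if PySem.Str.isIn "some college" e then
    "Some College Level"
  else if PySem.Str.isIn "college graduate" e then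
    "College Graduate"
  else if PySem.Str.isIn "vocational graduate" e then
    "Vocational Graduate"
  else if PySem.Str.isIn "vocational undergraduate" e then
    "Vocational Undergraduate"
  else if PySem.Str.isIn "bachelor" e || (PySem.Str.isIn "college" e || PySem.Str.isIn "university" e) then
    "Bachelor's Degree"
  else if PySem.Str.isIn "master" e then
    "Master's Degree"
  else if PySem.Str.isIn "phd" e || (PySem.Str.isIn "doctorate" e || PySem.Str.isIn "doctoral" e) then
    "Doctoral Degree"
  else if PySem.Str.isIn "tvet" e || (PySem.Str.isIn "technical-vocational" e || PySem.Str.isIn "tesda" e) then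
    "Technical-Vocational Education and Training"
  else
    pyTitle e

-- ===== PORT B =====
def pvPatterns : List (String × String) :=
  [ ("pre-school", "Early Childhood Education"),
    ("preschool", "Early Childhood Education"),
    ("kindergarten", "Early Childhood Education"),
    ("elementary", "Elementary School"),
    ("primary", "Elementary School"),
    ("junior high", "Junior High School"),
    ("secondary", "Junior High School"),
    ("senior high", "Senior High School"),
    ("associate", "Associate's Degree"),
    ("some college", "Some College Level"),
    ("college graduate", "College Graduate"),
    ("vocational graduate", "Vocational Graduate"),
    ("vocational undergraduate", "Vocational Undergraduate"),
    ("bachelor", "Bachelor's Degree"),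
    ("college", "Bachelor's Degree"),
    ("university", "Bachelor's Degree"),
    ("master", "Master's Degree"),
    ("phd", "Doctoral Degree"),
    ("doctorate", "Doctoral Degree"),
    ("doctoral", "Doctoral Degree"),
    ("tvet", "Technical-Vocational Education and Training"),
    ("technical-vocational", "Technical-Vocational Education and Training"),
    ("tesda", "Technical-Vocational Education and Training") ]

def pvOrder : List String :=
  [ "Early Childhood Education",
    "Elementary School",
    "Junior High School",
    "Senior High School",
    "Associate's Degree",
    "Some College Level",
    "College Graduate",
    "Vocational Graduate",
    "Vocational Undergraduate",
    "Bachelor's Degree",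
    "Master's Degree",
    "Doctoral Degree",
    "Technical-Vocational Education and Training" ]

-- ORDER.index as a key; every label in pvPatterns occurs in pvOrder, so Python's .index never
-- raises and the getD default is never used (exact on all reachable labels).
def pvRank (l : String) : Nat := (PySem.List.index? pvOrder l).getD 0

def normalize_education_alt (edu : String) : String :=
  let e := PySem.Str.lower edu
  let hits := pvPatterns.filterMap (fun q => if PySem.Str.isIn q.1 e then some q.2 else none)
  match PySem.List.min? hits pvRank with
  | some l => l
  | none => pyTitle e

-- ===== PRECONDITION & SPEC =====
def Spec_normalize_education (edu : String) (out : String) : Prop := out = normalize_education_alt edu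
instance (edu : String) (out : String) : Decidable (Spec_normalize_education edu out) := by unfold Spec_normalize_education; infer_instance

-- ===== CLAIM =====
def Claim_equal_normalize_education : Prop := ∀ (edu : String), Dom_normalize_education edu → Spec_normalize_education edu (normalize_education edu)

-- ===== LEMMAS AND PROOFS =====

theorem min?_fold_fixed {α : Type} (key : α → Nat) (m : α) (t : List α)
    (h : ∀ y ∈ t, key m ≤ key y) :
    t.foldl (fun acc x => match acc with
      | none => some x
      | some m => if key x < key m then some x else some m) (some m) = some m := by
  induction t with
  | nil => rfl
  | cons y t ih =>
    have hy : ¬ key y < key m := not_lt.mpr (h y (List.mem_cons_self))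
    simp only [List.foldl_cons, if_neg hy]
    exact ih (fun z hz => h z (List.mem_cons_of_mem _ hz))

theorem min?_eq_head_of_pairwise {α : Type} (key : α → Nat) (l : List α)
    (h : l.Pairwise (fun a b => key a ≤ key b)) :
    PySem.List.min? l key = l.head? := by
  cases l with
  | nil => rfl
  | cons x t =>
    simp only [PySem.List.min?, List.foldl_cons, List.head?_cons]
    exact min?_fold_fixed key x t (fun y hy => List.rel_of_pairwise_cons h hy)

theorem hits_pairwise (e : String) :
    (pvPatterns.filterMap (fun q => if PySem.Str.isIn q.1 e then some q.2 else none)).Pairwise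
      (fun a b => pvRank a ≤ pvRank b) := by
  rw [List.pairwise_filterMap]
  have hbase : pvPatterns.Pairwise (fun q r => pvRank q.2 ≤ pvRank r.2) := by decide
  refine hbase.imp ?_
  intro q r hqr x hx y hy
  have hx' : x = q.2 := by split at hx <;> simp_all
  have hy' : y = r.2 := by split at hy <;> simp_all
  subst hx'; subst hy'; exact hqr

theorem head?_peel (e : String) (p l : String) (t : List (String × String)) :
    (((p, l) :: t).filterMap (fun q => if PySem.Str.isIn q.1 e then some q.2 else none)).head?
      = if PySem.Str.isIn p e then some l
        else (t.filterMap (fun q => if PySem.Str.isIn q.1 e then some q.2 else none)).head? := by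
  by_cases h : PySem.Str.isIn p e = true
  · rw [List.filterMap_cons_some (b := l) (by rw [if_pos h]), if_pos h, List.head?_cons]
  · rw [List.filterMap_cons_none (by rw [if_neg h]), if_neg h]

theorem getD_if (c : Prop) [Decidable c] (a : String) (rest : Option String) (d : String) :
    (if c then some a else rest).getD d = if c then a else rest.getD d := by
  split <;> rfl

theorem pv_ite_or (a b : Bool) (x y : String) :
    (if (a || b) = true then x else y) = if a = true then x else if b = true then x else y := by
  cases a <;> simp

-- ===== VERDICT =====
theorem normalize_education_spec : Claim_equal_normalize_education := by
  intro edu _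
  show normalize_education edu = normalize_education_alt edu
  simp only [normalize_education, normalize_education_alt]
  rw [min?_eq_head_of_pairwise _ _ (hits_pairwise _)]
  have hmatch : ∀ (o : Option String) (d : String),
      (match o with | some l => l | none => d) = o.getD d := by
    intro o d; cases o <;> rfl
  rw [hmatch]
  simp only [pvPatterns, head?_peel, List.filterMap_nil, List.head?_nil, getD_if, Option.getD_none, pv_ite_or]
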